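-- pv_equiv track=rewrite | github.com/nnotMarss/projectMiranda | _system_.fld/lib/miranda_obfuscate/__init__.py | decode_2
-- ===== SOURCE A (Python) =====
-- def decode_2(input_text=""):
--     replacements = {
--         "(": "f", "=": "a", ",": "r", "$": "m", "\"": "n", "'": "j",
--         "*": "e", "#": "k", "~": "b", "}": "h", ".": "t", "/": "d",
--         "!": "g", "_": "s", "&": "q", "?": "p", ";": "u", "{": "z",
--         "-": "v", ")": "w", "`": "x", "+": "y", "^": "c", ":": "i",
--         "°": "o", "@": "l"
--     }
--
--     input_text = input_text.lower()
--     for key, value in replacements.items():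
--         input_text = input_text.replace(key, value)
--     return input_text
-- ===== SOURCE B (Python) =====
-- def decode_2(input_text=""):
--     replacements = {
--         "(": "f", "=": "a", ",": "r", "$": "m", "\"": "n", "'": "j",
--         "*": "e", "#": "k", "~": "b", "}": "h", ".": "t", "/": "d",
--         "!": "g", "_": "s", "&": "q", "?": "p", ";": "u", "{": "z",
--         "-": "v", ")": "w", "`": "x", "+": "y", "^": "c", ":": "i",
--         "°": "o", "@": "l"
--     }
--     return "".join(replacements.get(c, c) for c in input_text.lower())
-- ===== Notes on version B (the rewrite author's own statement) =====
-- stated objective: alternative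
-- what changed: Replaces A's 26 sequential str.replace passes (each rescanning the whole string) with a single left-to-right pass that maps each character of the lowercased string through the substitution dict with the character itself as default; asymptotically one scan instead of 26, though CPython's C-level str.replace makes A faster in wall time.
import Mathlib
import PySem

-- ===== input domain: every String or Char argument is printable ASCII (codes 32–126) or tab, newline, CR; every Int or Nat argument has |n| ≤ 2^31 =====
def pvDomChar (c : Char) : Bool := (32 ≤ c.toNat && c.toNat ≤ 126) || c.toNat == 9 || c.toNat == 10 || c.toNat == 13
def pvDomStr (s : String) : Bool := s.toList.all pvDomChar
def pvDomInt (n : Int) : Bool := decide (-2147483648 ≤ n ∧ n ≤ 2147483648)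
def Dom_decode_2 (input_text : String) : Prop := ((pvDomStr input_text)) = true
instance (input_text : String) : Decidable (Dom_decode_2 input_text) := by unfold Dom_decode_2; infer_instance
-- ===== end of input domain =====

-- B replaces A's 26 sequential str.replace passes with one pass mapping each char through the dict (return value identical).
-- ===== PORT A =====
def pvPairs : List (String × String) := [("(", "f"), ("=", "a"), (",", "r"), ("$", "m"), ("\"", "n"), ("'", "j"), ("*", "e"), ("#", "k"), ("~", "b"), ("}", "h"), (".", "t"), ("/", "d"), ("!", "g"), ("_", "s"), ("&", "q"), ("?", "p"), (";", "u"), ("{", "z"), ("-", "v"), (")", "w"), ("`", "x"), ("+", "y"), ("^", "c"), (":", "i"), ("°", "o"), ("@", "l")]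

def decode_2 (input_text : String) : String :=
  pvPairs.foldl (fun s kv => PySem.Str.replace s kv.1 kv.2) (PySem.Str.lower input_text)

-- ===== PORT B =====
def pvTable : PySem.Dict Char Char :=
  PySem.Dict.mk [('(', 'f'), ('=', 'a'), (',', 'r'), ('$', 'm'), ('\"', 'n'), ('\'', 'j'), ('*', 'e'), ('#', 'k'), ('~', 'b'), ('}', 'h'), ('.', 't'), ('/', 'd'), ('!', 'g'), ('_', 's'), ('&', 'q'), ('?', 'p'), (';', 'u'), ('{', 'z'), ('-', 'v'), (')', 'w'), ('`', 'x'), ('+', 'y'), ('^', 'c'), (':', 'i'), ('°', 'o'), ('@', 'l')]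

def decode_2_alt (input_text : String) : String :=
  String.ofList ((PySem.Str.lower input_text).toList.map (fun c => pvTable.getD c c))

-- ===== PRECONDITION & SPEC =====
def Spec_decode_2 (input_text : String) (out : String) : Prop := out = decode_2_alt input_text
instance (input_text : String) (out : String) : Decidable (Spec_decode_2 input_text out) := by unfold Spec_decode_2; infer_instance

-- ===== CLAIM =====
def Claim_equal_decode_2 : Prop := ∀ (input_text : String), Dom_decode_2 input_text → Spec_decode_2 input_text (decode_2 input_text)

-- ===== LEMMAS AND PROOFS =====
theorem go_single (k v : Char) : ∀ (fuel : Nat) (l acc : List Char), l.length ≤ fuel →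
    PySem.Chars.replace.go [k] [v] fuel l acc
      = acc.reverse ++ l.map (fun c => if c = k then v else c) := by
  intro fuel
  induction fuel with
  | zero => intro l acc h; simp at h; subst h; simp [PySem.Chars.replace.go]
  | succ n ih =>
    intro l acc h
    cases l with
    | nil => simp [PySem.Chars.replace.go]
    | cons c t =>
      simp only [PySem.Chars.replace.go]
      by_cases hc : c = k
      · subst hc
        simp only [List.isPrefixOf, beq_self_eq_true, Bool.true_and, if_true,
          List.length_singleton, List.drop_succ_cons, List.drop_zero]
        rw [ih t ([v].reverse ++ acc) (by simpa using Nat.le_of_succ_le_succ h)]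
        simp
      · have hp : ([k].isPrefixOf (c :: t)) = false := by
          simp [List.isPrefixOf]; exact fun hh => absurd hh.symm hc
        rw [hp]
        simp only [Bool.false_eq_true, if_false]
        rw [ih t (c :: acc) (by simpa using Nat.le_of_succ_le_succ h)]
        simp [hc]

theorem replace_single (l : List Char) (k v : Char) :
    PySem.Chars.replace l [k] [v] = l.map (fun c => if c = k then v else c) := by
  rw [PySem.Chars.replace]
  simp [go_single k v l.length l [] (le_refl _)]


theorem L0 (ps : List (String × String)) : ∀ (s0 : String),
    (ps.foldl (fun s kv => PySem.Str.replace s kv.1 kv.2) s0).toList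
    = (ps.map (fun kv => (kv.1.toList, kv.2.toList))).foldl
        (fun l p => PySem.Chars.replace l p.1 p.2) s0.toList := by
  induction ps with
  | nil => intro s0; rfl
  | cons kv ps ih =>
    intro s0
    simp only [List.foldl_cons, List.map_cons]
    rw [ih, PySem.Str.toList_replace]

theorem L1 (ps : List (List Char × List Char)) (hps : ∀ p ∈ ps, ∃ k v, p = ([k], [v])) :
    ∀ (l : List Char),
    ps.foldl (fun l p => PySem.Chars.replace l p.1 p.2) l
    = l.map (fun c => ps.foldl (fun x p => if [x] = p.1 then p.2.headD x else x) c) := by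
  induction ps with
  | nil => intro l; simp
  | cons p ps ih =>
    intro l
    obtain ⟨k, v, rfl⟩ := hps _ (List.mem_cons_self ..)
    have hps' : ∀ p ∈ ps, ∃ k v, p = ([k], [v]) := fun p hp => hps p (List.mem_cons_of_mem _ hp)
    simp only [List.foldl_cons, replace_single]
    rw [ih hps', List.map_map]
    apply List.map_congr_left
    intro c _
    simp only [Function.comp_apply]
    by_cases hc : c = k
    · subst hc; simp
    · simp [hc]

theorem L2 (ps : List (List Char × List Char)) (c : Char) (h : ∀ p ∈ ps, [c] ≠ p.1) :
    ps.foldl (fun x p => if [x] = p.1 then p.2.headD x else x) c = c := by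
  induction ps with
  | nil => rfl
  | cons p ps ih =>
    rw [List.foldl_cons, if_neg (h p (List.mem_cons_self ..))]
    exact ih (fun p hp => h p (List.mem_cons_of_mem _ hp))

-- ===== VERDICT =====
set_option maxHeartbeats 1000000 in
theorem decode_2_spec : Claim_equal_decode_2 := by
  intro s _
  unfold Spec_decode_2
  apply String.toList_inj.mp
  simp only [decode_2, decode_2_alt, String.toList_ofList]
  rw [L0]
  have hmap : pvPairs.map (fun kv => (kv.1.toList, kv.2.toList))
      = [(['('], ['f']), (['='], ['a']), ([','], ['r']), (['$'], ['m']), (['\"'], ['n']), (['\''], ['j']), (['*'], ['e']), (['#'], ['k']), (['~'], ['b']), (['}'], ['h']), (['.'], ['t']), (['/'], ['d']), (['!'], ['g']), (['_'], ['s']), (['&'], ['q']), (['?'], ['p']), ([';'], ['u']), (['{'], ['z']), (['-'], ['v']), ([')'], ['w']), (['`'], ['x']), (['+'], ['y']), (['^'], ['c']), ([':'], ['i']), (['°'], ['o']), (['@'], ['l'])] := rfl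
  rw [hmap, L1 _ (by intro p hp; fin_cases hp <;> exact ⟨_, _, rfl⟩)]
  rw [List.map_eq_map_iff]
  intro c _
  by_cases h0 : c = '('
  · subst h0; decide
  by_cases h1 : c = '='
  · subst h1; decide
  by_cases h2 : c = ','
  · subst h2; decide
  by_cases h3 : c = '$'
  · subst h3; decide
  by_cases h4 : c = '\"'
  · subst h4; decide
  by_cases h5 : c = '\''
  · subst h5; decide
  by_cases h6 : c = '*'
  · subst h6; decide
  by_cases h7 : c = '#'
  · subst h7; decide
  by_cases h8 : c = '~'
  · subst h8; decide
  by_cases h9 : c = '}'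
  · subst h9; decide
  by_cases h10 : c = '.'
  · subst h10; decide
  by_cases h11 : c = '/'
  · subst h11; decide
  by_cases h12 : c = '!'
  · subst h12; decide
  by_cases h13 : c = '_'
  · subst h13; decide
  by_cases h14 : c = '&'
  · subst h14; decide
  by_cases h15 : c = '?'
  · subst h15; decide
  by_cases h16 : c = ';'
  · subst h16; decide
  by_cases h17 : c = '{'
  · subst h17; decide
  by_cases h18 : c = '-'
  · subst h18; decide
  by_cases h19 : c = ')'
  · subst h19; decide
  by_cases h20 : c = '`'
  · subst h20; decide
  by_cases h21 : c = '+'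
  · subst h21; decide
  by_cases h22 : c = '^'
  · subst h22; decide
  by_cases h23 : c = ':'
  · subst h23; decide
  by_cases h24 : c = '°'
  · subst h24; decide
  by_cases h25 : c = '@'
  · subst h25; decide
  rw [L2 _ _ (by intro p hp; fin_cases hp <;> simp_all)]
  rw [PySem.Dict.getD_of_not_contains]
  simp only [pvTable, PySem.Dict.contains_mk, List.any_cons, List.any_nil,
    Bool.or_eq_false_iff, beq_eq_false_iff_ne, ne_eq]
  exact ⟨fun h => h0 h.symm, fun h => h1 h.symm, fun h => h2 h.symm, fun h => h3 h.symm,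
    fun h => h4 h.symm, fun h => h5 h.symm, fun h => h6 h.symm, fun h => h7 h.symm,
    fun h => h8 h.symm, fun h => h9 h.symm, fun h => h10 h.symm, fun h => h11 h.symm,
    fun h => h12 h.symm, fun h => h13 h.symm, fun h => h14 h.symm, fun h => h15 h.symm,
    fun h => h16 h.symm, fun h => h17 h.symm, fun h => h18 h.symm, fun h => h19 h.symm,
    fun h => h20 h.symm, fun h => h21 h.symm, fun h => h22 h.symm, fun h => h23 h.symm,
    fun h => h24 h.symm, fun h => h25 h.symm, trivial⟩
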